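-- pv_equiv track=rewrite | github.com/samuelffer/rbxmx-structural-parser | rbxbundle/deps.py | _mask_lua_comments_only
-- ===== SOURCE A (Python) =====
-- from typing import Dict, Iterable, List, Optional, Tuple
--
-- def _long_bracket_eq_count(src: str, i: int) -> Optional[int]:
--     """If src[i:] begins a long bracket opener [=*[ return eq_count else None."""
--     if i >= len(src) or src[i] != "[":
--         return None
--     j = i + 1
--     while j < len(src) and src[j] == "=":
--         j += 1
--     if j < len(src) and src[j] == "[":
--         return j - (i + 1)
--     return None
--
-- def _find_long_bracket_end(src: str, i: int, eq: int) -> Optional[int]: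
--     """Find end index (exclusive) for long bracket starting at i."""
--     opener = "[" + ("=" * eq) + "["
--     closer = "]" + ("=" * eq) + "]"
--     assert src.startswith(opener, i)
--     j = src.find(closer, i + len(opener))
--     if j == -1:
--         return None
--     return j + len(closer)
--
-- def _mask_lua_comments_only(src: str) -> str:
--     """Replace comment text with spaces (preserving newlines), keep strings intact."""
--
--     out = list(src)
--     i = 0
--     n = len(src)
--
--     def mark_to_space(a: int, b: int) -> None:
--         for k in range(a, b):
--             if out[k] != "\n":
--                 out[k] = " "
--
--     while i < n:
--         c = src[i]
--
--         # line comment -- ...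
--         if c == "-" and i + 1 < n and src[i + 1] == "-":
--             # block comment --[[ ... ]] or --[=[ ... ]=]
--             if i + 3 < n and src[i + 2] == "[":
--                 eq = _long_bracket_eq_count(src, i + 2)
--                 if eq is not None:
--                     end = _find_long_bracket_end(src, i + 2, eq)
--                     if end is None:
--                         mark_to_space(i, n)
--                         break
--                     mark_to_space(i, end)
--                     i = end
--                     continue
--
--             # normal line comment
--             j = src.find("\n", i)
--             if j == -1:
--                 mark_to_space(i, n)
--                 break
--             mark_to_space(i, j)
--             i = j
--             continue
--
--         i += 1
--
--     return "".join(out)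
-- ===== SOURCE B (Python) =====
-- def _mask_lua_comments_only(src: str) -> str:
--     """One-pass character state machine: no str.find, no index jumps."""
--     CODE, DASH, START, OPENER, LINE, BLOCK = 0, 1, 2, 3, 4, 5
--     out = []
--     state = CODE
--     eq = 0   # '=' count of the current long bracket (OPENER/BLOCK)
--     p = 0    # matched prefix length of the closer "]" + "="*eq + "]" (BLOCK)
--
--     for c in src:
--         m = c if c == "\n" else " "
--         if state == CODE:
--             if c == "-":
--                 state = DASH
--             else:
--                 out.append(c)
--         elif state == DASH:
--             if c == "-":
--                 out.append(" ")
--                 out.append(" ")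
--                 state = START
--             else:
--                 out.append("-")
--                 out.append(c)
--                 state = CODE
--         elif state == START:
--             if c == "[":
--                 out.append(" ")
--                 state, eq = OPENER, 0
--             elif c == "\n":
--                 out.append("\n")
--                 state = CODE
--             else:
--                 out.append(" ")
--                 state = LINE
--         elif state == OPENER:
--             if c == "=":
--                 out.append(" ")
--                 eq += 1
--             elif c == "[":
--                 out.append(" ")
--                 state, p = BLOCK, 0
--             elif c == "\n":
--                 out.append("\n")
--                 state = CODE
--             else:
--                 out.append(" ")
--                 state = LINE
--         elif state == LINE:
--             if c == "\n":
--                 out.append("\n")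
--                 state = CODE
--             else:
--                 out.append(" ")
--         else:  # BLOCK
--             out.append(m)
--             expected = "]" if (p == 0 or p == eq + 1) else "="
--             if c == expected:
--                 if p + 1 == eq + 2:
--                     state = CODE
--                 else:
--                     p += 1
--             else:
--                 p = 1 if c == "]" else 0
--
--     if state == DASH:
--         out.append("-")
--     return "".join(out)
-- ===== Notes on version B (the rewrite author's own statement) =====
-- stated objective: alternative
-- what changed: Replaces A's cursor-plus-str.find scan that overwrites a mutable copy of the source with a single forward character-at-a-time finite-state machine (code/dash/comment-start/opener/line/block states, with a partial-match counter for the long-bracket closer) that emits the masked output directly.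
import Mathlib
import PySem

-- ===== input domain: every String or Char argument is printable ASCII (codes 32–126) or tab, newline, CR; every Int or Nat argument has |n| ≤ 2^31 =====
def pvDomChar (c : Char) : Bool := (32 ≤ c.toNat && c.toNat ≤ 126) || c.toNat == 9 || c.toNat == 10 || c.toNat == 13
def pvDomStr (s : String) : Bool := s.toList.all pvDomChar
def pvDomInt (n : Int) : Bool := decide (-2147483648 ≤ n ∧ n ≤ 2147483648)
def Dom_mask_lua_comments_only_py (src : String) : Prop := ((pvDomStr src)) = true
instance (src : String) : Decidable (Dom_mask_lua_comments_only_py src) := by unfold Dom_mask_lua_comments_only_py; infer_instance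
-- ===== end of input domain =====

-- B replaces A's cursor-and-find masking of a mutable copy by a single forward
-- character-at-a-time state machine (objective: alternative, same O(n) cost).

-- ===== PORT A =====
-- port of mark_to_space: for k in range(a, b): if out[k] != "\n": out[k] = " "
-- (the loop body runs exactly b - a times; the counter is that count)
def pvMarkGo : Nat → List Char → Nat → List Char
  | 0, out, _ => out
  | f + 1, out, k => pvMarkGo f (if out.getD k ' ' ≠ '\n' then out.set k ' ' else out) (k + 1)

def pvMark (out : List Char) (a b : Nat) : List Char := pvMarkGo (b - a) out a

-- port of the while-loop of _long_bracket_eq_count (cursor j skips '='; the loop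
-- runs at most cs.length - j times, which bounds the counter)
def pvEqLoopGo (cs : List Char) : Nat → Nat → Nat
  | 0, j => j
  | f + 1, j => if j < cs.length ∧ cs.getD j ' ' = '=' then pvEqLoopGo cs f (j + 1) else j

def pvEqLoop (cs : List Char) (j : Nat) : Nat := pvEqLoopGo cs (cs.length - j) j

-- port of _long_bracket_eq_count
def pvEqCount (cs : List Char) (i : Nat) : Option Nat :=
  if i < cs.length ∧ cs.getD i ' ' = '[' then
    let j := pvEqLoop cs (i + 1)
    if j < cs.length ∧ cs.getD j ' ' = '[' then some (j - (i + 1)) else none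
  else none

def pvCloser (eq : Nat) : List Char := ']' :: (List.replicate eq '=' ++ [']'])

-- port of _find_long_bracket_end (src.find(closer, i + len(opener)) via PySem.Chars.findFrom)
def pvFindEnd (cs : List Char) (i eq : Nat) : Option Nat :=
  if PySem.Chars.findFrom cs (pvCloser eq) ((i + (eq + 2) : Nat) : Int) = -1 then none
  else some ((PySem.Chars.findFrom cs (pvCloser eq) ((i + (eq + 2) : Nat) : Int)).toNat + (eq + 2))

-- port of the main while-loop of _mask_lua_comments_only (i strictly increases
-- each iteration, so the loop runs at most cs.length - i times; the counter is
-- that bound)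
def pvMaskLoopGo (cs : List Char) : Nat → List Char → Nat → List Char
  | 0, out, _ => out
  | f + 1, out, i =>
    if i < cs.length then
      if cs.getD i ' ' = '-' ∧ i + 1 < cs.length ∧ cs.getD (i + 1) ' ' = '-' then
        match (if i + 3 < cs.length ∧ cs.getD (i + 2) ' ' = '[' then pvEqCount cs (i + 2) else none) with
        | some eqn =>
          match pvFindEnd cs (i + 2) eqn with
          | none => pvMark out i cs.length
          | some e => pvMaskLoopGo cs f (pvMark out i e) e
        | none =>
          if PySem.Chars.findFrom cs ['\n'] (i : Int) = -1 then pvMark out i cs.length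
          else pvMaskLoopGo cs f (pvMark out i (PySem.Chars.findFrom cs ['\n'] (i : Int)).toNat)
                (PySem.Chars.findFrom cs ['\n'] (i : Int)).toNat
      else pvMaskLoopGo cs f out (i + 1)
    else out

def pvMaskLoop (cs out : List Char) (i : Nat) : List Char :=
  pvMaskLoopGo cs (cs.length - i) out i

def mask_lua_comments_only_py (src : String) : String :=
  String.ofList (pvMaskLoop src.toList src.toList 0)

-- ===== PORT B =====
inductive PvSt : Type where
  | code : PvSt
  | dash : PvSt
  | start : PvSt
  | opener : Nat → PvSt
  | line : PvSt
  | block : Nat → Nat → PvSt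
deriving DecidableEq, Repr

def pvMaskChar (c : Char) : Char := if c = '\n' then '\n' else ' '

def pvRun : PvSt → List Char → List Char
  | .dash, [] => ['-']
  | _, [] => []
  | .code, c :: rest => if c = '-' then pvRun .dash rest else c :: pvRun .code rest
  | .dash, c :: rest =>
      if c = '-' then ' ' :: ' ' :: pvRun .start rest else '-' :: c :: pvRun .code rest
  | .start, c :: rest =>
      if c = '[' then ' ' :: pvRun (.opener 0) rest
      else if c = '\n' then '\n' :: pvRun .code rest
      else ' ' :: pvRun .line rest
  | .opener eq, c :: rest =>
      if c = '=' then ' ' :: pvRun (.opener (eq + 1)) rest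
      else if c = '[' then ' ' :: pvRun (.block eq 0) rest
      else if c = '\n' then '\n' :: pvRun .code rest
      else ' ' :: pvRun .line rest
  | .line, c :: rest => if c = '\n' then '\n' :: pvRun .code rest else ' ' :: pvRun .line rest
  | .block eq p, c :: rest =>
      if c = (if p = 0 ∨ p = eq + 1 then ']' else '=') then
        if p + 1 = eq + 2 then pvMaskChar c :: pvRun .code rest
        else pvMaskChar c :: pvRun (.block eq (p + 1)) rest
      else pvMaskChar c :: pvRun (.block eq (if c = ']' then 1 else 0)) rest

def mask_lua_comments_only_py_alt (src : String) : String :=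
  String.ofList (pvRun .code src.toList)

-- ===== PRECONDITION & SPEC =====
def Spec_mask_lua_comments_only_py (src : String) (out : String) : Prop := out = mask_lua_comments_only_py_alt src
instance (src : String) (out : String) : Decidable (Spec_mask_lua_comments_only_py src out) := by unfold Spec_mask_lua_comments_only_py; infer_instance

-- ===== CLAIM (what is proved, stated in full; the proofs are below) =====
def Claim_equal_mask_lua_comments_only_py : Prop := ∀ (src : String), Dom_mask_lua_comments_only_py src → Spec_mask_lua_comments_only_py src (mask_lua_comments_only_py src)

-- ===== LEMMAS AND PROOFS =====
def pvMask (l : List Char) : List Char := l.map pvMaskChar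

-- getD through a known getElem? (used throughout the proofs)
theorem pv_getD_eq (cs : List Char) (i : Nat) (c : Char) (h : cs[i]? = some c) :
    cs.getD i ' ' = c := by simp [List.getD_eq_getElem?_getD, h]

theorem pvMask_cons (c : Char) (l : List Char) : pvMask (c :: l) = pvMaskChar c :: pvMask l := rfl

theorem pvMaskChar_ne (c : Char) (h : c ≠ '\n') : pvMaskChar c = ' ' := by simp [pvMaskChar, h]

-- generic index bridges
theorem pv_drop_elem (cs : List Char) (i k : Nat) (u : List Char) (hdu : cs.drop i = u) :
    cs[i + k]? = u[k]? := by subst hdu; simp [List.getElem?_drop]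

theorem pv_drop_more (cs : List Char) (i k : Nat) (u : List Char) (hdu : cs.drop i = u) :
    cs.drop (i + k) = u.drop k := by subst hdu; rw [← List.drop_drop]

-- splitting helpers
theorem pv_splitNl (l : List Char) : '\n' ∈ l → ∃ l1 l2, l = l1 ++ '\n' :: l2 ∧ '\n' ∉ l1 := by
  induction l with
  | nil => intro h; simp at h
  | cons c t ih =>
    intro h
    by_cases hc : c = '\n'
    · exact ⟨[], t, by simp [hc], by simp⟩
    · have ht : '\n' ∈ t := by
        rcases List.mem_cons.1 h with h1 | h1
        · exact absurd h1.symm hc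
        · exact h1
      obtain ⟨l1, l2, he, hn⟩ := ih ht
      refine ⟨c :: l1, l2, by rw [List.cons_append, he], ?_⟩
      intro hm
      rcases List.mem_cons.1 hm with h1 | h1
      · exact hc h1.symm
      · exact hn h1

theorem pv_splitEqRun (l : List Char) :
    ∃ m r, l = List.replicate m '=' ++ r ∧ r.head? ≠ some '=' := by
  induction l with
  | nil => exact ⟨0, [], by simp, by simp⟩
  | cons c t ih =>
    by_cases hc : c = '='
    · obtain ⟨m, r, he, hn⟩ := ih
      exact ⟨m + 1, r, by simp [hc, he, List.replicate_succ], hn⟩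
    · exact ⟨0, c :: t, by simp, by simp [hc]⟩

-- 'first newline' characterization of Python's str.find("\n", i)
theorem pv_singleton_prefix_drop (u : List Char) (k : Nat) :
    ['\n'] <+: u.drop k ↔ u[k]? = some '\n' := by
  constructor
  · rintro ⟨t, ht⟩
    have : (u.drop k)[0]? = some '\n' := by rw [← ht]; rfl
    simpa [List.getElem?_drop] using this
  · intro h
    have hk : k < u.length := (List.getElem?_eq_some_iff.1 h).1
    rw [List.drop_eq_getElem_cons hk]
    have h2 : u[k] = '\n' := by
      have h3 := List.getElem?_eq_getElem hk
      rw [h] at h3; exact (Option.some.inj h3).symm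
    rw [h2]
    exact ⟨u.drop (k + 1), rfl⟩

theorem pv_find_nl_none (u : List Char) (h : '\n' ∉ u) :
    PySem.Chars.find u ['\n'] = -1 := by
  rw [PySem.Chars.find_eq_neg_one_iff]
  intro hinf
  rcases hinf with ⟨s, t, hst⟩
  apply h
  rw [← hst]
  simp

theorem pv_find_nl_some (u u1 u2 : List Char) (he : u = u1 ++ '\n' :: u2) (h1 : '\n' ∉ u1) :
    PySem.Chars.find u ['\n'] = (u1.length : Int) := by
  subst he
  have hocc : ['\n'] <+: (u1 ++ '\n' :: u2).drop u1.length := by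
    rw [pv_singleton_prefix_drop, List.getElem?_append_right (le_refl _)]
    simp
  have hnn : 0 ≤ PySem.Chars.find (u1 ++ '\n' :: u2) ['\n'] := by
    rw [PySem.Chars.find_nonneg_iff]
    exact ⟨u1, u2, by simp⟩
  obtain ⟨hpre, hmin⟩ := PySem.Chars.find_spec hnn
  have hle : (PySem.Chars.find (u1 ++ '\n' :: u2) ['\n']).toNat ≤ u1.length := by
    by_contra hgt
    push_neg at hgt
    exact hmin u1.length hgt hocc
  have hge : u1.length ≤ (PySem.Chars.find (u1 ++ '\n' :: u2) ['\n']).toNat := by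
    by_contra hgt
    push_neg at hgt
    have h5 := (pv_singleton_prefix_drop (u1 ++ '\n' :: u2) _).1 hpre
    rw [List.getElem?_append_left (by omega)] at h5
    exact h1 (List.mem_of_getElem? h5)
  omega

theorem pv_findFrom_nl_none (cs : List Char) (i : Nat) (hi : i ≤ cs.length)
    (h : '\n' ∉ cs.drop i) : PySem.Chars.findFrom cs ['\n'] (i : Int) = -1 := by
  rw [PySem.Chars.findFrom_natCast cs ['\n'] i hi, pv_find_nl_none _ h]
  simp

theorem pv_findFrom_nl_some (cs : List Char) (i : Nat) (hi : i ≤ cs.length)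
    (u1 u2 : List Char) (he : cs.drop i = u1 ++ '\n' :: u2) (h1 : '\n' ∉ u1) :
    PySem.Chars.findFrom cs ['\n'] (i : Int) = ((i + u1.length : Nat) : Int) := by
  rw [PySem.Chars.findFrom_natCast cs ['\n'] i hi, pv_find_nl_some _ u1 u2 he h1]
  have h2 : ((u1.length : Int)) ≠ -1 := by omega
  simp only [h2, if_false]
  push_cast
  ring

-- set at the length of the left part
theorem pv_set_append_len (P : List Char) (c x : Char) (t : List Char) :
    (P ++ c :: t).set P.length x = P ++ x :: t := by
  induction P with
  | nil => rfl
  | cons a P ih => simp [List.set, ih]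

-- mark_to_space over a decomposed buffer
theorem pvMarkGo_spec : ∀ (m : Nat) (P t : List Char), m ≤ t.length →
    pvMarkGo m (P ++ t) P.length = P ++ pvMask (t.take m) ++ t.drop m := by
  intro m
  induction m with
  | zero =>
    intro P t _
    simp [pvMarkGo, pvMask]
  | succ m ih =>
    intro P t hm
    rcases t with _ | ⟨c, t'⟩
    · simp at hm
    rw [pvMarkGo]
    have hget : (P ++ c :: t').getD P.length ' ' = c := by
      apply pv_getD_eq
      simp [List.getElem?_append_right]
    rw [hget]
    have hstep : (if c ≠ '\n' then (P ++ c :: t').set P.length ' ' else P ++ c :: t')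
        = (P ++ [pvMaskChar c]) ++ t' := by
      by_cases hc : c = '\n'
      · subst hc; simp [pvMaskChar]
      · simp [hc, pv_set_append_len, pvMaskChar]
    rw [hstep]
    rw [show P.length + 1 = (P ++ [pvMaskChar c]).length by simp]
    rw [ih (P ++ [pvMaskChar c]) t' (by simp at hm ⊢; omega)]
    simp [pvMask]

theorem pvMark_spec (m : Nat) (P t : List Char) (hm : m ≤ t.length) :
    pvMark (P ++ t) P.length (P.length + m) = P ++ pvMask (t.take m) ++ t.drop m := by
  rw [pvMark, Nat.add_sub_cancel_left]
  exact pvMarkGo_spec m P t hm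

-- the '=' skipping cursor
theorem pvEqLoopGo_spec : ∀ (m : Nat) (f : Nat) (cs : List Char) (j : Nat) (r : List Char),
    m ≤ f → cs.drop j = List.replicate m '=' ++ r → r.head? ≠ some '=' →
    pvEqLoopGo cs f j = j + m := by
  intro m
  induction m with
  | zero =>
    intro f cs j r _ hd hh
    have hneg : ¬ (j < cs.length ∧ cs.getD j ' ' = '=') := by
      rintro ⟨hj, heq⟩
      apply hh
      have h3 : cs[j]? = some (cs[j]'hj) := List.getElem?_eq_getElem hj
      have h0 : cs[j]? = r[0]? := by simpa using pv_drop_elem cs j 0 r (by simpa using hd)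
      have hr0 : r[0]? = some '=' := by
        rw [← h0, h3]
        have := pv_getD_eq cs j _ h3
        rw [heq] at this
        rw [← this]
      rcases r with _ | ⟨x, r'⟩
      · simp at hr0
      · simpa using hr0
    rcases f with _ | f
    · simp [pvEqLoopGo]
    · rw [pvEqLoopGo, if_neg hneg]
      omega
  | succ m ih =>
    intro f cs j r hf hd hh
    have h0 : cs[j]? = some '=' := by
      have := pv_drop_elem cs j 0 _ hd
      simpa [List.replicate_succ] using this
    rcases f with _ | f
    · omega
    rw [pvEqLoopGo]
    rw [if_pos ⟨(List.getElem?_eq_some_iff.1 h0).1, pv_getD_eq cs j '=' h0⟩]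
    have hd' : cs.drop (j + 1) = List.replicate m '=' ++ r := by
      have := pv_drop_more cs j 1 _ hd
      simpa [List.replicate_succ] using this
    rw [ih f cs (j + 1) r (by omega) hd' hh]
    omega

theorem pvEqLoop_spec (m : Nat) (cs : List Char) (j : Nat) (r : List Char)
    (hd : cs.drop j = List.replicate m '=' ++ r) (hh : r.head? ≠ some '=') :
    pvEqLoop cs j = j + m := by
  have hml : m ≤ cs.length - j := by
    have h6 := congrArg List.length hd
    simp [List.length_drop] at h6
    omega
  rw [pvEqLoop]
  exact pvEqLoopGo_spec m (cs.length - j) cs j r hml hd hh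

-- closer pattern facts
theorem pvCloser_length (eq : Nat) : (pvCloser eq).length = eq + 2 := by simp [pvCloser]

theorem pvCloser_getElem? (eq k : Nat) (hk : k ≤ eq + 1) :
    (pvCloser eq)[k]? = some (if k = 0 ∨ k = eq + 1 then ']' else '=') := by
  rcases k with _ | k
  · simp [pvCloser]
  · simp only [pvCloser, List.getElem?_cons_succ]
    by_cases hke : k < eq
    · rw [List.getElem?_append_left (by simp; omega)]
      simp [List.getElem?_replicate, hke]
      omega
    · have hkeq : k = eq := by omega
      subst hkeq
      rw [List.getElem?_append_right (by simp)]
      simp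

theorem pvCloser_take_succ (eq p : Nat) (hp : p ≤ eq + 1) :
    (pvCloser eq).take (p + 1) = (pvCloser eq).take p ++ [if p = 0 ∨ p = eq + 1 then ']' else '='] := by
  rw [List.take_add_one, pvCloser_getElem? eq p hp]
  rfl

theorem pvCloser_take_full (eq : Nat) : (pvCloser eq).take (eq + 2) = pvCloser eq := by
  rw [← pvCloser_length eq]; exact List.take_length

theorem pvCloser_take_len (eq p : Nat) (hp : p ≤ eq + 1) :
    ((pvCloser eq).take p).length = p := by
  simp [pvCloser_length]; omega

-- B: the line state masks to the newline
theorem pv_run_line_no (w : List Char) (h : '\n' ∉ w) : pvRun .line w = pvMask w := by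
  induction w with
  | nil => rfl
  | cons c t ih =>
    have hc : c ≠ '\n' := fun hc => h (by simp [hc])
    rw [pvRun]
    simp only [hc, if_false]
    rw [ih (fun hm => h (by simp [hm])), pvMask_cons, pvMaskChar_ne c hc]

theorem pv_run_line_some (w1 w2 : List Char) (h : '\n' ∉ w1) :
    pvRun .line (w1 ++ '\n' :: w2) = pvMask w1 ++ '\n' :: pvRun .code w2 := by
  induction w1 with
  | nil => simp [pvRun, pvMask]
  | cons c t ih =>
    have hc : c ≠ '\n' := fun hc => h (by simp [hc])
    rw [List.cons_append, pvRun]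
    simp only [hc, if_false]
    rw [ih (fun hm => h (by simp [hm])), pvMask_cons, pvMaskChar_ne c hc]
    rfl

-- B: the opener state skips '=' runs
theorem pv_run_opener (m : Nat) : ∀ (e : Nat) (r : List Char),
    pvRun (.opener e) (List.replicate m '=' ++ r) =
      List.replicate m ' ' ++ pvRun (.opener (e + m)) r := by
  induction m with
  | zero => intro e r; simp
  | succ m ih =>
    intro e r
    rw [List.replicate_succ, List.cons_append, pvRun]
    simp only [if_pos]
    rw [ih (e + 1) r, List.replicate_succ]
    simp [Nat.add_assoc, Nat.add_comm 1 m]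

-- B: the block state with no closer in sight masks everything
theorem pvBlockNone (eq : Nat) : ∀ (w : List Char) (p : Nat), p ≤ eq + 1 →
    ¬ pvCloser eq <:+: ((pvCloser eq).take p ++ w) → pvRun (.block eq p) w = pvMask w := by
  intro w
  induction w with
  | nil => intro p _ _; rfl
  | cons c rest ih =>
    intro p hp hnone
    rw [pvRun]
    by_cases hc : c = (if p = 0 ∨ p = eq + 1 then ']' else '=')
    · rw [if_pos hc]
      by_cases hclose : p + 1 = eq + 2
      · exfalso
        apply hnone
        have hp1 : p = eq + 1 := by omega
        have hctx : (pvCloser eq).take p ++ c :: rest = pvCloser eq ++ rest := by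
          rw [show (c :: rest) = [c] ++ rest from rfl, ← List.append_assoc]
          congr 1
          rw [hc, hp1, ← pvCloser_take_succ eq (eq + 1) (le_refl _)]
          simp [pvCloser_take_full]
        rw [hctx]
        exact ⟨[], rest, by simp⟩
      · rw [if_neg hclose]
        have hctx : (pvCloser eq).take (p + 1) ++ rest = (pvCloser eq).take p ++ c :: rest := by
          rw [pvCloser_take_succ eq p hp, ← hc]; simp
        rw [ih (p + 1) (by omega) (by rw [hctx]; exact hnone)]
        rw [pvMask_cons]
    · rw [if_neg hc]
      have hsuffix : ((pvCloser eq).take (if c = ']' then 1 else 0) ++ rest)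
          <:+ ((pvCloser eq).take p ++ c :: rest) := by
        by_cases h : c = ']'
        · have h1 : (pvCloser eq).take 1 = [']'] := by simp [pvCloser]
          simp only [if_pos h, h1, h]
          exact ⟨(pvCloser eq).take p, rfl⟩
        · simp only [if_neg h, List.take_zero, List.nil_append]
          exact ⟨(pvCloser eq).take p ++ [c], by simp⟩
      rw [ih (if c = ']' then 1 else 0)
            (by by_cases h : c = ']' <;> simp [h])
            (fun hinf => hnone (hinf.trans hsuffix.isInfix))]
      rw [pvMask_cons]

-- B: the block state closes exactly at the first closer occurrence
theorem pvBlockClose (eq : Nat) : ∀ (w : List Char) (p q : Nat), p ≤ eq + 1 →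
    pvCloser eq <+: ((pvCloser eq).take p ++ w).drop q →
    (∀ r, r < q → ¬ pvCloser eq <+: ((pvCloser eq).take p ++ w).drop r) →
    pvRun (.block eq p) w =
      pvMask (w.take (q + (eq + 2) - p)) ++ pvRun .code (w.drop (q + (eq + 2) - p)) := by
  intro w
  induction w with
  | nil =>
    intro p q hp hocc _
    exfalso
    have hlen := hocc.length_le
    simp [pvCloser_length, List.length_drop, List.length_take] at hlen
    omega
  | cons c rest ih =>
    intro p q hp hocc hmin
    have htlen : ((pvCloser eq).take p).length = p := pvCloser_take_len eq p hp
    -- the char at absolute index p of the context list is c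
    have hTp : ((pvCloser eq).take p ++ c :: rest)[p]? = some c := by
      rw [List.getElem?_append_right (by omega), htlen]
      simp
    rw [pvRun]
    by_cases hc : c = (if p = 0 ∨ p = eq + 1 then ']' else '=')
    · rw [if_pos hc]
      by_cases hclose : p + 1 = eq + 2
      · rw [if_pos hclose]
        have hp1 : p = eq + 1 := by omega
        have hctx : (pvCloser eq).take p ++ c :: rest = pvCloser eq ++ rest := by
          rw [show (c :: rest) = [c] ++ rest from rfl, ← List.append_assoc]
          congr 1
          rw [hc, hp1, ← pvCloser_take_succ eq (eq + 1) (le_refl _)]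
          simp [pvCloser_take_full]
        have hq0 : q = 0 := by
          by_contra hq
          exact hmin 0 (by omega) (by rw [hctx]; simpa using List.prefix_append (pvCloser eq) rest)
        subst hq0
        have he1 : 0 + (eq + 2) - p = 1 := by omega
        rw [he1]
        simp [pvMask_cons, pvMask]
      · rw [if_neg hclose]
        have hp' : p + 1 ≤ eq + 1 := by omega
        have hctx : (pvCloser eq).take (p + 1) ++ rest = (pvCloser eq).take p ++ c :: rest := by
          rw [pvCloser_take_succ eq p hp, ← hc]; simp
        rw [ih (p + 1) q hp' (by rw [hctx]; exact hocc) (fun r hr => by rw [hctx]; exact hmin r hr)]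
        have hE : q + (eq + 2) - p = (q + (eq + 2) - (p + 1)) + 1 := by omega
        rw [hE, List.take_succ_cons, List.drop_succ_cons, pvMask_cons]
        simp
    · rw [if_neg hc]
      -- occurrence char equations
      obtain ⟨t, ht⟩ := hocc
      have hchar : ∀ k, k < eq + 2 →
          ((pvCloser eq).take p ++ c :: rest)[q + k]? = (pvCloser eq)[k]? := by
        intro k hk
        have h4 : (((pvCloser eq).take p ++ c :: rest).drop q)[k]? = (pvCloser eq)[k]? := by
          rw [← ht, List.getElem?_append_left (by rw [pvCloser_length]; omega)]
        rw [← h4, List.getElem?_drop]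
      by_cases hcj : c = ']'
      · -- mismatch on ']' : here 1 ≤ p ≤ eq, restart with partial match 1
        have hpmid : ¬ (p = 0 ∨ p = eq + 1) := by
          intro hor
          rw [if_pos hor] at hc
          exact hc hcj
        have hqp : p ≤ q := by
          by_contra hlt
          push_neg at hlt
          have h5 := hchar (p - q) (by omega)
          rw [show q + (p - q) = p by omega, hTp] at h5
          rw [pvCloser_getElem? eq (p - q) (by omega)] at h5
          have : c = (if p - q = 0 ∨ p - q = eq + 1 then ']' else '=') := Option.some.inj h5
          rw [if_neg (by omega)] at this
          rw [hcj] at this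
          simp at this
        have hdropp : ((pvCloser eq).take p ++ c :: rest).drop p = c :: rest := by
          have h6 : ((pvCloser eq).take p ++ c :: rest).drop ((pvCloser eq).take p).length = c :: rest :=
            List.drop_left
          rwa [htlen] at h6
        have hctx1 : (pvCloser eq).take 1 ++ rest = c :: rest := by
          simp [pvCloser, hcj]
        have hocc' : pvCloser eq <+: ((pvCloser eq).take 1 ++ rest).drop (q - p) := by
          rw [hctx1, ← hdropp, List.drop_drop, show p + (q - p) = q by omega]
          exact ⟨t, ht⟩
        have hmin' : ∀ r, r < q - p → ¬ pvCloser eq <+: ((pvCloser eq).take 1 ++ rest).drop r := by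
          intro r hr
          rw [hctx1, ← hdropp, List.drop_drop]
          exact hmin (p + r) (by omega)
        rw [if_pos hcj]
        rw [ih 1 (q - p) (by omega) hocc' hmin']
        have hE : q + (eq + 2) - p = ((q - p) + (eq + 2) - 1) + 1 := by omega
        rw [hE, List.take_succ_cons, List.drop_succ_cons, pvMask_cons]
        simp
      · -- full restart
        have hqp : p + 1 ≤ q := by
          by_contra hlt
          push_neg at hlt
          have h5 := hchar (p - q) (by omega)
          rw [show q + (p - q) = p by omega, hTp] at h5
          rw [pvCloser_getElem? eq (p - q) (by omega)] at h5
          have h6 : c = (if p - q = 0 ∨ p - q = eq + 1 then ']' else '=') := Option.some.inj h5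
          by_cases h7 : p - q = 0 ∨ p - q = eq + 1
          · rw [if_pos h7] at h6
            exact hcj h6
          · rw [if_neg h7] at h6
            -- c = '=' ; then expected was ']' i.e. p = 0 ∨ p = eq+1
            have h8 : p = 0 ∨ p = eq + 1 := by
              by_contra h9
              rw [if_neg h9] at hc
              exact hc h6
            -- p = 0 impossible: then q = 0 and p - q = 0
            have hp1 : p = eq + 1 := by
              rcases h8 with h8 | h8
              · omega
              · exact h8
            -- q ≥ 1 and q < p ; char at index q of context is C[q] = ']' forces q = 0
            have hq1 : 1 ≤ q := by omega
            have h10 := hchar 0 (by omega)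
            rw [Nat.add_zero] at h10
            have h11 : ((pvCloser eq).take p ++ c :: rest)[q]? = (pvCloser eq)[q]? := by
              rw [List.getElem?_append_left (by omega), List.getElem?_take_of_lt (by omega)]
            rw [h11] at h10
            rw [pvCloser_getElem? eq q (by omega), pvCloser_getElem? eq 0 (by omega)] at h10
            have h12 := Option.some.inj h10
            rw [if_neg (by omega), if_pos (by omega)] at h12
            simp at h12
        have hdropp : ((pvCloser eq).take p ++ c :: rest).drop (p + 1) = rest := by
          have h6 : (((pvCloser eq).take p ++ [c]) ++ rest).drop ((pvCloser eq).take p ++ [c]).length = rest :=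
            List.drop_left
          rw [show (pvCloser eq).take p ++ [c] ++ rest = (pvCloser eq).take p ++ c :: rest by simp] at h6
          rwa [show ((pvCloser eq).take p ++ [c]).length = p + 1 by simp [htlen]] at h6
        have hocc' : pvCloser eq <+: ((pvCloser eq).take 0 ++ rest).drop (q - (p + 1)) := by
          rw [List.take_zero, List.nil_append, ← hdropp, List.drop_drop,
            show p + 1 + (q - (p + 1)) = q by omega]
          exact ⟨t, ht⟩
        have hmin' : ∀ r, r < q - (p + 1) → ¬ pvCloser eq <+: ((pvCloser eq).take 0 ++ rest).drop r := by
          intro r hr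
          rw [List.take_zero, List.nil_append, ← hdropp, List.drop_drop]
          exact hmin (p + 1 + r) (by omega)
        rw [if_neg hcj]
        rw [ih 0 (q - (p + 1)) (by omega) hocc' hmin']
        have hE : q + (eq + 2) - p = ((q - (p + 1)) + (eq + 2) - 0) + 1 := by omega
        rw [hE, List.take_succ_cons, List.drop_succ_cons, pvMask_cons]
        simp

-- shared endgames of the main induction
theorem pvMain_lineNone (cs : List Char) (fuel i : Nat) (P : List Char)
    (hilt : i < cs.length) (hP : P.length = i)
    (hguard : cs.getD i ' ' = '-' ∧ i + 1 < cs.length ∧ cs.getD (i + 1) ' ' = '-')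
    (hBE : (if i + 3 < cs.length ∧ cs.getD (i + 2) ' ' = '[' then pvEqCount cs (i + 2) else none) = none)
    (hnl : '\n' ∉ cs.drop i) :
    pvMaskLoopGo cs (fuel + 1) (P ++ cs.drop i) i = P ++ pvMask (cs.drop i) := by
  rw [pvMaskLoopGo, if_pos hilt, if_pos hguard]
  split
  · rename_i eqn heq
    rw [hBE] at heq
    cases heq
  · subst hP
    rw [if_pos (pv_findFrom_nl_none cs P.length hilt.le hnl)]
    have hlen : cs.length = P.length + (cs.drop P.length).length := by
      simp [List.length_drop]; omega
    rw [hlen, pvMark_spec _ P (cs.drop P.length) (le_refl _), List.take_length,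
      List.drop_length, List.append_nil]

theorem pvMain_lineSome (cs : List Char) (fuel i : Nat) (P u1 u2 : List Char)
    (IH : ∀ (i' : Nat) (P' : List Char), i' ≤ cs.length → P'.length = i' → cs.length - i' ≤ fuel →
      pvMaskLoopGo cs fuel (P' ++ cs.drop i') i' = P' ++ pvRun .code (cs.drop i'))
    (hilt : i < cs.length) (hP : P.length = i) (hf : cs.length - i ≤ fuel + 1)
    (hguard : cs.getD i ' ' = '-' ∧ i + 1 < cs.length ∧ cs.getD (i + 1) ' ' = '-')
    (hBE : (if i + 3 < cs.length ∧ cs.getD (i + 2) ' ' = '[' then pvEqCount cs (i + 2) else none) = none)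
    (hdu : cs.drop i = u1 ++ '\n' :: u2) (h1 : '\n' ∉ u1) (h10 : u1 ≠ []) :
    pvMaskLoopGo cs (fuel + 1) (P ++ cs.drop i) i = P ++ (pvMask u1 ++ '\n' :: pvRun .code u2) := by
  have hulen : cs.length - i = u1.length + 1 + u2.length := by
    have h6 := congrArg List.length hdu
    simp [List.length_drop] at h6
    omega
  rw [pvMaskLoopGo, if_pos hilt, if_pos hguard]
  split
  · rename_i eqn heq
    rw [hBE] at heq
    cases heq
  · subst hP
    have hnlpos := pv_findFrom_nl_some cs P.length hilt.le u1 u2 hdu h1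
    rw [if_neg (by rw [hnlpos]; intro hcontra; omega)]
    rw [hnlpos, Int.toNat_natCast]
    have hdrop' : cs.drop (P.length + u1.length) = '\n' :: u2 := by
      rw [pv_drop_more cs P.length u1.length _ hdu, List.drop_left]
    rw [hdu]
    rw [pvMark_spec u1.length P (u1 ++ '\n' :: u2) (by simp)]
    rw [List.take_left, List.drop_left]
    rw [show P ++ pvMask u1 ++ '\n' :: u2 = (P ++ pvMask u1) ++ cs.drop (P.length + u1.length) by
      rw [hdrop']]
    have h0 : 0 < u1.length := List.length_pos_of_ne_nil h10
    rw [IH (P.length + u1.length) (P ++ pvMask u1) (by omega) (by simp [pvMask]) (by omega)]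
    rw [hdrop']
    simp [pvRun]

theorem pvMain (cs : List Char) : ∀ (fuel i : Nat) (P : List Char), i ≤ cs.length →
    P.length = i → cs.length - i ≤ fuel →
    pvMaskLoopGo cs fuel (P ++ cs.drop i) i = P ++ pvRun .code (cs.drop i) := by
  intro fuel
  induction fuel with
  | zero =>
    intro i P hi hP hf
    have hd0 : cs.drop i = [] := List.drop_eq_nil_of_le (by omega)
    rw [hd0]
    simp [pvMaskLoopGo, pvRun]
  | succ fuel ih =>
    intro i P hi hP hf
    by_cases hilt : i < cs.length
    case neg =>
      have hd0 : cs.drop i = [] := List.drop_eq_nil_of_le (by omega)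
      rw [hd0, pvMaskLoopGo, if_neg hilt]
      simp [pvRun]
    case pos =>
    rcases hdu0 : cs.drop i with _ | ⟨c, r⟩
    · exfalso
      have h6 := congrArg List.length hdu0
      simp [List.length_drop] at h6
      omega
    have hg0 : cs.getD i ' ' = c := pv_getD_eq cs i c (by simpa using pv_drop_elem cs i 0 _ hdu0)
    have hdr1 : cs.drop (i + 1) = r := by simpa using pv_drop_more cs i 1 _ hdu0
    by_cases hc : c = '-'
    case neg =>
      rw [pvMaskLoopGo, if_pos hilt,
        if_neg (by rintro ⟨h1, -, -⟩; rw [hg0] at h1; exact hc h1)]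
      rw [show P ++ c :: r = (P ++ [c]) ++ cs.drop (i + 1) by rw [hdr1]; simp]
      rw [ih (i + 1) (P ++ [c]) (by omega) (by simp [hP]) (by omega), hdr1]
      rw [pvRun, if_neg hc]
      simp
    case pos =>
    subst hc
    rcases r with _ | ⟨c2, r2⟩
    · have hlen1 : cs.length - i = 1 := by
        have h6 := congrArg List.length hdu0
        simp [List.length_drop] at h6
        omega
      rw [pvMaskLoopGo, if_pos hilt, if_neg (by rintro ⟨-, h2, -⟩; omega)]
      rw [show P ++ ['-'] = (P ++ ['-']) ++ cs.drop (i + 1) by rw [hdr1]; simp]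
      rw [ih (i + 1) (P ++ ['-']) (by omega) (by simp [hP]) (by omega), hdr1]
      simp [pvRun]
    have hg1 : cs.getD (i + 1) ' ' = c2 := pv_getD_eq _ _ _ (by simpa using pv_drop_elem cs i 1 _ hdu0)
    by_cases hc2 : c2 = '-'
    case neg =>
      rw [pvMaskLoopGo, if_pos hilt,
        if_neg (by rintro ⟨-, -, h3⟩; rw [hg1] at h3; exact hc2 h3)]
      rw [show P ++ '-' :: c2 :: r2 = (P ++ ['-']) ++ cs.drop (i + 1) by rw [hdr1]; simp]
      rw [ih (i + 1) (P ++ ['-']) (by omega) (by simp [hP]) (by omega), hdr1]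
      simp [pvRun, hc2]
    case pos =>
    subst hc2
    have hlu2 : cs.length - i = r2.length + 2 := by
      have h6 := congrArg List.length hdu0
      simp [List.length_drop] at h6
      omega
    have hguard : cs.getD i ' ' = '-' ∧ i + 1 < cs.length ∧ cs.getD (i + 1) ' ' = '-' :=
      ⟨hg0, by omega, hg1⟩
    rcases r2 with _ | ⟨c3, r3⟩
    · -- "--" at end of input
      have hl0 : cs.length - i = 2 := by simpa using hlu2
      have hBE : (if i + 3 < cs.length ∧ cs.getD (i + 2) ' ' = '[' then pvEqCount cs (i + 2) else none) = none := by
        rw [if_neg]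
        rintro ⟨h3, -⟩
        omega
      rw [← hdu0, pvMain_lineNone cs fuel i P hilt hP hguard hBE (by rw [hdu0]; simp)]
      rw [hdu0]
      simp [pvMask, pvRun, pvMaskChar]
    simp only [List.length_cons] at hlu2
    have hg2 : cs.getD (i + 2) ' ' = c3 := pv_getD_eq _ _ _ (by simpa using pv_drop_elem cs i 2 _ hdu0)
    have hdr3 : cs.drop (i + 3) = r3 := by simpa using pv_drop_more cs i 3 _ hdu0
    have hlu3 : cs.length - i = r3.length + 3 := by omega
    by_cases hc3 : c3 = '['
    case neg =>
      have hBE : (if i + 3 < cs.length ∧ cs.getD (i + 2) ' ' = '[' then pvEqCount cs (i + 2) else none) = none := by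
        rw [if_neg]
        rintro ⟨-, h4⟩
        rw [hg2] at h4
        exact hc3 h4
      by_cases hc3n : c3 = '\n'
      · subst hc3n
        rw [← hdu0, pvMain_lineSome cs fuel i P ['-', '-'] r3 ih hilt hP hf hguard hBE (by rw [hdu0]; rfl)
          (by simp) (by simp)]
        rw [hdu0]
        simp [pvRun, pvMask, pvMaskChar]
      · by_cases hnl3 : '\n' ∈ r3
        · obtain ⟨w1, u2, hw, hwn⟩ := pv_splitNl r3 hnl3
          rw [← hdu0, pvMain_lineSome cs fuel i P ('-'::'-'::c3::w1) u2 ih hilt hP hf hguard hBE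
              (by rw [hdu0, hw]; simp)
              (by
                intro hm
                simp only [List.mem_cons] at hm
                rcases hm with h | h | h | h
                · exact absurd h (by decide)
                · exact absurd h (by decide)
                · exact hc3n h.symm
                · exact hwn h)
              (by simp)]
          rw [hdu0, hw]
          rw [show pvRun .code ('-'::'-'::c3::(w1 ++ '\n'::u2)) =
              ' '::' '::' ':: pvRun .line (w1 ++ '\n'::u2) from by simp [pvRun, hc3, hc3n]]
          rw [pv_run_line_some w1 u2 hwn]
          simp [pvMask, pvMaskChar, hc3n]
        · rw [← hdu0, pvMain_lineNone cs fuel i P hilt hP hguard hBE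
              (by
                rw [hdu0]
                intro hm
                simp only [List.mem_cons] at hm
                rcases hm with h | h | h | h
                · exact absurd h (by decide)
                · exact absurd h (by decide)
                · exact hc3n h.symm
                · exact hnl3 h)]
          rw [hdu0]
          rw [show pvRun .code ('-'::'-'::c3::r3) = ' '::' '::' ':: pvRun .line r3 from by
            simp [pvRun, hc3, hc3n]]
          rw [pv_run_line_no r3 hnl3]
          simp [pvMask, pvMaskChar, hc3n]
    case pos =>
    subst hc3
    obtain ⟨m, r4, hr4, hr4h⟩ := pv_splitEqRun r3
    have hr3l : r3.length = m + r4.length := by rw [hr4]; simp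
    have hdr3m : cs.drop (i + 3 + m) = r4 := by
      rw [pv_drop_more cs (i + 3) m _ hdr3, hr4]
      have h6 : (List.replicate m '=' ++ r4).drop (List.replicate m '=').length = r4 := List.drop_left
      simpa using h6
    rcases r4 with _ | ⟨c5, body⟩
    · -- trailing "--[=^m"
      have hlen4 : cs.length - i = m + 3 := by
        simp only [List.length_nil, Nat.add_zero] at hr3l
        omega
      have hBE : (if i + 3 < cs.length ∧ cs.getD (i + 2) ' ' = '[' then pvEqCount cs (i + 2) else none) = none := by
        by_cases hm0 : m = 0
        · subst hm0
          rw [if_neg]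
          rintro ⟨h4, -⟩
          simp at hr3l
          omega
        · rw [if_pos ⟨by omega, hg2⟩]
          simp only [pvEqCount]
          rw [if_pos ⟨by omega, hg2⟩]
          rw [show i + 2 + 1 = i + 3 by omega]
          rw [pvEqLoop_spec m cs (i + 3) [] (by rw [hdr3]; simpa using hr4) (by simp)]
          rw [if_neg]
          rintro ⟨h5, -⟩
          omega
      rw [← hdu0, pvMain_lineNone cs fuel i P hilt hP hguard hBE (by rw [hdu0, hr4]; simp [List.mem_replicate])]
      rw [hdu0, hr4]
      rw [show pvRun .code ('-'::'-'::'['::(List.replicate m '=' ++ ([] : List Char))) =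
          ' '::' '::' ':: pvRun (.opener 0) (List.replicate m '=' ++ ([] : List Char)) from by
        simp [pvRun]]
      rw [pv_run_opener m 0 []]
      simp [pvMask, pvMaskChar, pvRun]
    -- r4 = c5 :: body
    have hlen4 : cs.length - i = m + body.length + 4 := by
      simp only [List.length_cons] at hr3l
      omega
    have h5e : cs[i + 3 + m]? = some c5 := by simpa using pv_drop_elem cs (i + 3 + m) 0 _ hdr3m
    have hg5 : cs.getD (i + 3 + m) ' ' = c5 := pv_getD_eq _ _ _ h5e
    have hc5e : c5 ≠ '=' := by intro h; exact hr4h (by simp [h])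
    have hbody : cs.drop (i + 3 + m + 1) = body := by
      simpa using pv_drop_more cs (i + 3 + m) 1 _ hdr3m
    by_cases hc5 : c5 = '['
    case pos =>
      subst hc5
      have hEqC : pvEqCount cs (i + 2) = some m := by
        simp only [pvEqCount]
        rw [if_pos ⟨by omega, hg2⟩]
        rw [show i + 2 + 1 = i + 3 by omega]
        rw [pvEqLoop_spec m cs (i + 3) ('['::body) (by rw [hdr3, hr4]) (by simp)]
        rw [if_pos ⟨by omega, hg5⟩]
        congr 1
        omega
      have hBE : (if i + 3 < cs.length ∧ cs.getD (i + 2) ' ' = '[' then pvEqCount cs (i + 2) else none) = some m := by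
        rw [if_pos ⟨by omega, hg2⟩]
        exact hEqC
      have hdropS : cs.drop (i + 2 + (m + 2)) = body := by
        rw [show i + 2 + (m + 2) = i + 3 + m + 1 by omega]
        exact hbody
      rw [pvMaskLoopGo, if_pos hilt, if_pos hguard]
      split
      · rename_i eqn heq
        rw [hBE] at heq
        injection heq with heq2
        subst heq2
        split
        · rename_i hfe
          -- unterminated block: mask to the end
          have hqf : PySem.Chars.find body (pvCloser m) = -1 := by
            by_contra hq
            have hge0 : 0 ≤ PySem.Chars.find body (pvCloser m) := by
              have h7 := PySem.Chars.neg_one_le_find body (pvCloser m)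
              omega
            unfold pvFindEnd at hfe
            rw [PySem.Chars.findFrom_natCast cs (pvCloser m) (i + 2 + (m + 2)) (by omega), hdropS] at hfe
            rw [if_neg hq] at hfe
            rw [if_neg (by omega)] at hfe
            cases hfe
          have hninf : ¬ pvCloser m <:+: body := (PySem.Chars.find_eq_neg_one_iff body (pvCloser m)).1 hqf
          subst hP
          rw [show cs.length = P.length + ('-'::'-'::'['::r3).length from by simp; omega]
          rw [pvMark_spec (('-'::'-'::'['::r3).length) P ('-'::'-'::'['::r3) (le_refl _),
            List.take_length, List.drop_length, List.append_nil]
          rw [hr4]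
          rw [show pvRun .code ('-'::'-'::'['::(List.replicate m '=' ++ '['::body)) =
              ' '::' '::' ':: pvRun (.opener 0) (List.replicate m '=' ++ '['::body) from by
            simp [pvRun]]
          rw [pv_run_opener m 0 ('['::body), Nat.zero_add]
          rw [show pvRun (.opener m) ('['::body) = ' ' :: pvRun (.block m 0) body from by
            simp [pvRun]]
          rw [pvBlockNone m body 0 (by omega) (by simpa using hninf)]
          simp [pvMask, pvMaskChar]
        · rename_i e hfe
          have hgeneg : PySem.Chars.find body (pvCloser m) ≠ -1 := by
            intro hq
            unfold pvFindEnd at hfe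
            rw [PySem.Chars.findFrom_natCast cs (pvCloser m) (i + 2 + (m + 2)) (by omega), hdropS, hq] at hfe
            simp at hfe
          have hge0 : 0 ≤ PySem.Chars.find body (pvCloser m) := by
            have h7 := PySem.Chars.neg_one_le_find body (pvCloser m)
            omega
          obtain ⟨hpre, hmin⟩ := PySem.Chars.find_spec hge0
          have hqlen : (PySem.Chars.find body (pvCloser m)).toNat + (m + 2) ≤ body.length := by
            have h7 := hpre.length_le
            simp [pvCloser_length, List.length_drop] at h7
            omega
          have he : e = i + ((4 + m) + ((PySem.Chars.find body (pvCloser m)).toNat + (m + 2))) := by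
            unfold pvFindEnd at hfe
            rw [PySem.Chars.findFrom_natCast cs (pvCloser m) (i + 2 + (m + 2)) (by omega), hdropS] at hfe
            rw [if_neg hgeneg, if_neg (by omega)] at hfe
            have h8 := Option.some.inj hfe
            omega
          subst hP
          set q := (PySem.Chars.find body (pvCloser m)).toNat with hq
          have hsplit : cs.drop P.length = ('-'::'-'::'['::(List.replicate m '=' ++ ['['])) ++ body := by
            rw [hdu0, hr4]
            simp
          have hplen : ('-'::'-'::'['::(List.replicate m '=' ++ (['['] : List Char))).length = 4 + m := by
            simp
            omega
          rw [hr4]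
          rw [show ('-'::'-'::'['::(List.replicate m '=' ++ '['::body) : List Char) =
            ('-'::'-'::'['::(List.replicate m '=' ++ ['['])) ++ body from by simp]
          rw [show e = P.length + ((4 + m) + (q + (m + 2))) by omega]
          rw [pvMark_spec ((4 + m) + (q + (m + 2))) P
            (('-'::'-'::'['::(List.replicate m '=' ++ ['['])) ++ body) (by simp; omega)]
          have htk : (('-'::'-'::'['::(List.replicate m '=' ++ ['['])) ++ body).take ((4 + m) + (q + (m + 2)))
              = ('-'::'-'::'['::(List.replicate m '=' ++ ['['])) ++ body.take (q + (m + 2)) := by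
            rw [show (4 + m) + (q + (m + 2)) =
              ('-'::'-'::'['::(List.replicate m '=' ++ (['['] : List Char))).length + (q + (m + 2)) by
                rw [hplen]]
            rw [List.take_append, List.take_of_length_le (by omega), Nat.add_sub_cancel_left]
          have hdk : (('-'::'-'::'['::(List.replicate m '=' ++ ['['])) ++ body).drop ((4 + m) + (q + (m + 2)))
              = body.drop (q + (m + 2)) := by
            rw [show (4 + m) + (q + (m + 2)) =
              ('-'::'-'::'['::(List.replicate m '=' ++ (['['] : List Char))).length + (q + (m + 2)) by
                rw [hplen]]
            rw [List.drop_append, List.drop_eq_nil_of_le (by omega), Nat.add_sub_cancel_left,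
              List.nil_append]
          rw [htk, hdk]
          have hdropE : cs.drop (P.length + ((4 + m) + (q + (m + 2)))) = body.drop (q + (m + 2)) := by
            rw [pv_drop_more cs P.length ((4 + m) + (q + (m + 2))) _ hsplit]
            exact hdk
          rw [show P ++ pvMask (('-'::'-'::'['::(List.replicate m '=' ++ ['['])) ++ body.take (q + (m + 2))) ++ body.drop (q + (m + 2))
              = (P ++ pvMask (('-'::'-'::'['::(List.replicate m '=' ++ ['['])) ++ body.take (q + (m + 2)))) ++ cs.drop (P.length + ((4 + m) + (q + (m + 2)))) by
            rw [hdropE]]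
          rw [ih (P.length + ((4 + m) + (q + (m + 2)))) _ (by omega)
            (by simp [pvMask]; omega) (by omega)]
          rw [hdropE]
          rw [show ('-'::'-'::'['::(List.replicate m '=' ++ ['['])) ++ body =
            '-'::'-'::'['::(List.replicate m '=' ++ '['::body) by simp]
          rw [show pvRun .code ('-'::'-'::'['::(List.replicate m '=' ++ '['::body)) =
              ' '::' '::' ':: pvRun (.opener 0) (List.replicate m '=' ++ '['::body) from by
            simp [pvRun]]
          rw [pv_run_opener m 0 ('['::body), Nat.zero_add]
          rw [show pvRun (.opener m) ('['::body) = ' ' :: pvRun (.block m 0) body from by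
            simp [pvRun]]
          rw [pvBlockClose m body 0 q (by omega) (by simpa using hpre)
            (by intro r hr; simpa using hmin r hr)]
          simp [pvMask, pvMaskChar]
      · rename_i heq
        rw [hBE] at heq
        cases heq
    case neg =>
      -- opener fails at c5: ordinary line comment
      have hBE : (if i + 3 < cs.length ∧ cs.getD (i + 2) ' ' = '[' then pvEqCount cs (i + 2) else none) = none := by
        rw [if_pos ⟨by omega, hg2⟩]
        simp only [pvEqCount]
        rw [if_pos ⟨by omega, hg2⟩]
        rw [show i + 2 + 1 = i + 3 by omega]
        rw [pvEqLoop_spec m cs (i + 3) (c5::body) (by rw [hdr3, hr4]) hr4h]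
        rw [if_neg]
        rintro ⟨-, h5⟩
        rw [hg5] at h5
        exact hc5 h5
      by_cases hc5n : c5 = '\n'
      · subst hc5n
        rw [← hdu0, pvMain_lineSome cs fuel i P ('-'::'-'::'['::List.replicate m '=') body ih hilt hP hf hguard hBE
            (by rw [hdu0, hr4]; simp)
            (by
              intro hm
              simp only [List.mem_cons, List.mem_replicate] at hm
              rcases hm with h | h | h | h
              · exact absurd h (by decide)
              · exact absurd h (by decide)
              · exact absurd h (by decide)
              · exact absurd h.2 (by decide))
            (by simp)]
        rw [hdu0, hr4]
        rw [show pvRun .code ('-'::'-'::'['::(List.replicate m '=' ++ '\n'::body)) =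
            ' '::' '::' ':: pvRun (.opener 0) (List.replicate m '=' ++ '\n'::body) from by
          simp [pvRun]]
        rw [pv_run_opener m 0 ('\n'::body), Nat.zero_add]
        rw [show pvRun (.opener m) ('\n'::body) = '\n' :: pvRun .code body from by simp [pvRun]]
        simp [pvMask, pvMaskChar]
      · by_cases hnlb : '\n' ∈ body
        · obtain ⟨w1, u2, hw, hwn⟩ := pv_splitNl body hnlb
          rw [← hdu0, pvMain_lineSome cs fuel i P ('-'::'-'::'['::(List.replicate m '=' ++ c5::w1)) u2 ih hilt hP hf hguard hBE
              (by rw [hdu0, hr4, hw]; simp)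
              (by
                intro hm
                simp only [List.mem_cons, List.mem_append, List.mem_replicate] at hm
                rcases hm with h | h | h | h
                · exact absurd h (by decide)
                · exact absurd h (by decide)
                · exact absurd h (by decide)
                · rcases h with h | h
                  · exact absurd h.2 (by decide)
                  · rcases h with h | h
                    · exact hc5n h.symm
                    · exact hwn h)
              (by simp)]
          rw [hdu0, hr4, hw]
          rw [show pvRun .code ('-'::'-'::'['::(List.replicate m '=' ++ c5::(w1 ++ '\n'::u2))) =
              ' '::' '::' ':: pvRun (.opener 0) (List.replicate m '=' ++ c5::(w1 ++ '\n'::u2)) from by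
            simp [pvRun]]
          rw [pv_run_opener m 0 (c5::(w1 ++ '\n'::u2)), Nat.zero_add]
          rw [show pvRun (.opener m) (c5::(w1 ++ '\n'::u2)) = ' ' :: pvRun .line (w1 ++ '\n'::u2) from by
            rw [pvRun, if_neg hc5e, if_neg hc5, if_neg hc5n]]
          rw [pv_run_line_some w1 u2 hwn]
          simp [pvMask, pvMaskChar, hc5n]
        · rw [← hdu0, pvMain_lineNone cs fuel i P hilt hP hguard hBE
              (by
                rw [hdu0, hr4]
                intro hm
                simp only [List.mem_cons, List.mem_append, List.mem_replicate] at hm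
                rcases hm with h | h | h | h
                · exact absurd h (by decide)
                · exact absurd h (by decide)
                · exact absurd h (by decide)
                · rcases h with h | h
                  · exact absurd h.2 (by decide)
                  · rcases h with h | h
                    · exact hc5n h.symm
                    · exact hnlb h)]
          rw [hdu0, hr4]
          rw [show pvRun .code ('-'::'-'::'['::(List.replicate m '=' ++ c5::body)) =
              ' '::' '::' ':: pvRun (.opener 0) (List.replicate m '=' ++ c5::body) from by
            simp [pvRun]]
          rw [pv_run_opener m 0 (c5::body), Nat.zero_add]
          rw [show pvRun (.opener m) (c5::body) = ' ' :: pvRun .line body from by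
            rw [pvRun, if_neg hc5e, if_neg hc5, if_neg hc5n]]
          rw [pv_run_line_no body hnlb]
          simp [pvMask, pvMaskChar, hc5n]

-- ===== VERDICT (by name: the statement is the Claim_ definition above) =====
theorem mask_lua_comments_only_py_spec : Claim_equal_mask_lua_comments_only_py := by
  intro src _
  unfold Spec_mask_lua_comments_only_py mask_lua_comments_only_py mask_lua_comments_only_py_alt
  have h := pvMain src.toList src.toList.length 0 [] (by omega) rfl (by omega)
  simpa [pvMaskLoop] using congrArg String.ofList h
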